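-- pv_equiv track=rewrite | github.com/0cd/ivprep | python3/project_euler/001_sum_of_multiples_of_3_and_5.py | createGeneratorForMultiplesOf3Or5
-- ===== SOURCE A (Python) =====
-- def createGeneratorForMultiplesOf3Or5(limit):
--     m3 = m5 = 0
--     while True:
--         if (m3 == m5):
--             m = m3
--             m3, m5 = m3 + 3, m5 + 5
--         elif (m3 < m5):
--             m = m3
--             m3 += 3
--         else:
--             m = m5
--             m5 += 5
--         if (m < limit):
--             yield m
--         else:
--             break
-- ===== SOURCE B (Python) =====
-- def createGeneratorForMultiplesOf3Or5(limit):
--     i = 0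
--     while i < limit:
--         if i % 3 == 0 or i % 5 == 0:
--             yield i
--         i += 1
-- ===== Notes on version B (the rewrite author's own statement) =====
-- stated objective: idiomatic
-- what changed: Replaces A's two-pointer merge of the multiples-of-3 and multiples-of-5 streams with a single linear scan i = 0,1,2,... that yields i when i % 3 == 0 or i % 5 == 0.
import Mathlib
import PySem

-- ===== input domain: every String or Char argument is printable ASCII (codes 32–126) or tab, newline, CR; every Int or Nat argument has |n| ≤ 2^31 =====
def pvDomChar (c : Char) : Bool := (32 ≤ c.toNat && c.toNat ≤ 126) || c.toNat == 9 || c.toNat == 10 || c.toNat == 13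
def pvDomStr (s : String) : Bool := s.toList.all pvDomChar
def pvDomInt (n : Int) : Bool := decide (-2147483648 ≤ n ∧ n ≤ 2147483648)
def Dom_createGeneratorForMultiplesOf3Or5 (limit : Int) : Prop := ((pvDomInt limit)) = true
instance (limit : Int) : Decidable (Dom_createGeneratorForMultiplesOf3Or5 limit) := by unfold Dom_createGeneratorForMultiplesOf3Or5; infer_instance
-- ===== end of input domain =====

-- B replaces A's two-pointer merge of the 3- and 5-multiple streams with a single
-- filtered linear scan over all integers (idiomatic; same asymptotic cost).


-- ===== PORT A =====
-- A's loop: merge the two streams m3 = 0,3,6,… and m5 = 0,5,10,…, emitting the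
-- smaller head each round (both advance when equal), until the emitted value ≥ limit.
def pvLoopA (limit m3 m5 : Int) : List Int :=
  if m3 = m5 then
    (if m3 < limit then m3 :: pvLoopA limit (m3 + 3) (m5 + 5) else [])
  else if m3 < m5 then
    (if m3 < limit then m3 :: pvLoopA limit (m3 + 3) m5 else [])
  else
    (if m5 < limit then m5 :: pvLoopA limit m3 (m5 + 5) else [])
termination_by (limit - min m3 m5).toNat
decreasing_by all_goals (simp only [min_def]; omega)

def createGeneratorForMultiplesOf3Or5 (limit : Int) : List Int :=
  pvLoopA limit 0 0

-- ===== PORT B =====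
-- B's loop: i = 0; while i < limit: yield i if i % 3 == 0 or i % 5 == 0; i += 1
def pvLoopB (limit i : Int) : List Int :=
  if i < limit then
    (if i % 3 = 0 ∨ i % 5 = 0 then i :: pvLoopB limit (i + 1) else pvLoopB limit (i + 1))
  else []
termination_by (limit - i).toNat
decreasing_by all_goals omega

def createGeneratorForMultiplesOf3Or5_alt (limit : Int) : List Int :=
  pvLoopB limit 0

-- ===== PRECONDITION & SPEC =====
def Spec_createGeneratorForMultiplesOf3Or5 (limit : Int) (out : List Int) : Prop := out = createGeneratorForMultiplesOf3Or5_alt limit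
instance (limit : Int) (out : List Int) : Decidable (Spec_createGeneratorForMultiplesOf3Or5 limit out) := by unfold Spec_createGeneratorForMultiplesOf3Or5; infer_instance

-- ===== CLAIM (what is proved, stated in full; the proofs are below) =====
def Claim_equal_createGeneratorForMultiplesOf3Or5 : Prop := ∀ (limit : Int), Dom_createGeneratorForMultiplesOf3Or5 limit → Spec_createGeneratorForMultiplesOf3Or5 limit (createGeneratorForMultiplesOf3Or5 limit)

-- ===== LEMMAS AND PROOFS =====

-- Invariant: m3 and m5 are the smallest multiples of 3 resp. 5 that are ≥ i.
theorem pvLoop_eq (n : Nat) : ∀ (limit i m3 m5 : Int),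
    (limit - i).toNat ≤ n →
    i ≤ m3 → m3 < i + 3 → m3 % 3 = 0 →
    i ≤ m5 → m5 < i + 5 → m5 % 5 = 0 →
    pvLoopA limit m3 m5 = pvLoopB limit i := by
  induction n with
  | zero =>
    intro limit i m3 m5 hn h1 h2 h3 h4 h5 h6
    have hlim : limit ≤ i := by omega
    rw [pvLoopA, pvLoopB]
    split_ifs <;> first | rfl | omega
  | succ n ih =>
    intro limit i m3 m5 hn h1 h2 h3 h4 h5 h6
    by_cases hlt : i < limit
    · rw [pvLoopB, if_pos hlt]
      by_cases h35 : i % 3 = 0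
      · have hm3 : m3 = i := by omega
        by_cases h55 : i % 5 = 0
        · have hm5 : m5 = i := by omega
          rw [pvLoopA, hm3, hm5, if_pos rfl, if_pos (by omega : i < limit), if_pos (Or.inl h35)]
          exact congrArg _ (ih limit (i + 1) (i + 3) (i + 5) (by omega)
            (by omega) (by omega) (by omega) (by omega) (by omega) (by omega))
        · rw [pvLoopA, hm3, if_neg (by omega : ¬ i = m5), if_pos (by omega : i < m5),
              if_pos (by omega : i < limit), if_pos (Or.inl h35)]
          exact congrArg _ (ih limit (i + 1) (i + 3) m5 (by omega)
            (by omega) (by omega) (by omega) (by omega) (by omega) h6)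
      · by_cases h55 : i % 5 = 0
        · have hm5 : m5 = i := by omega
          rw [pvLoopA, hm5, if_neg (by omega : ¬ m3 = i), if_neg (by omega : ¬ m3 < i),
              if_pos (by omega : i < limit), if_pos (Or.inr h55)]
          exact congrArg _ (ih limit (i + 1) m3 (i + 5) (by omega)
            (by omega) (by omega) h3 (by omega) (by omega) (by omega))
        · rw [if_neg (by omega : ¬ (i % 3 = 0 ∨ i % 5 = 0))]
          exact ih limit (i + 1) m3 m5 (by omega)
            (by omega) (by omega) h3 (by omega) (by omega) h6
    · rw [pvLoopA, pvLoopB]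
      split_ifs <;> first | rfl | omega

-- ===== VERDICT (by name: the statement is the Claim_ definition above) =====
theorem createGeneratorForMultiplesOf3Or5_spec : Claim_equal_createGeneratorForMultiplesOf3Or5 := by
  intro limit _
  unfold Spec_createGeneratorForMultiplesOf3Or5 createGeneratorForMultiplesOf3Or5
    createGeneratorForMultiplesOf3Or5_alt
  exact pvLoop_eq (limit - 0).toNat limit 0 0 0 le_rfl (by omega) (by omega) (by omega)
    (by omega) (by omega) (by omega)
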